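-- pv_equiv track=rewrite | github.com/Catrunaround/tai | ai_chatbot_backend/app/services/rag_postprocess.py | _parse_json_string_token
-- ===== SOURCE A (Python) =====
-- def _parse_json_string_token(text: str, quote_index: int) -> tuple[str, int, bool]:
--     """
--     Parse a JSON string token starting at the opening `"` at `quote_index`.
--
--     Returns:
--         raw_contents: The raw (still-escaped) contents between quotes.
--         next_index: Index immediately after the closing quote (or end-of-text if incomplete).
--         complete: True if a closing quote was found, else False (streaming/incomplete JSON).
--     """
--     raw_chars: list[str] = []
--     index = quote_index + 1
--     escape_next = False
--     text_len = len(text)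
--     while index < text_len:
--         ch = text[index]
--         if escape_next:
--             raw_chars.append(ch)
--             escape_next = False
--             index += 1
--             continue
--         if ch == "\\":
--             raw_chars.append(ch)
--             escape_next = True
--             index += 1
--             continue
--         if ch == '"':
--             return "".join(raw_chars), index + 1, True
--         raw_chars.append(ch)
--         index += 1
--     return "".join(raw_chars), index, False
-- ===== SOURCE B (Python) =====
-- def _parse_json_string_token(text: str, quote_index: int) -> tuple[str, int, bool]:
--     n = len(text)
--     start = quote_index + 1
--     i = start
--     while True:
--         pos = text.find('"', i)
--         if pos == -1:
--             return text[start:], max(start, n), False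
--         # count the consecutive backslashes immediately before pos (not before start)
--         j = pos
--         while j > start and text[j - 1] == '\\':
--             j -= 1
--         if (pos - j) % 2 == 0:
--             return text[start:pos], pos + 1, True
--         i = pos + 1
-- ===== Notes on version B (the rewrite author's own statement) =====
-- stated objective: faster
-- what changed: Replaces the character-by-character scan with an escape_next flag and a char-list accumulator by repeated text.find('"', i) jumps: the parity of the backslash run immediately before each found quote decides whether it closes the string, and the result is a slice of text instead of a joined list.
-- intended difference: For quote_index <= -2 (a negative start position, never produced by a JSON tokenizer) A scans with Python's negative-index wraparound and re-reads characters, e.g. A('ab',-2) = ('bab', 2, False), while B reads the suffix once and returns ('b', 2, False), the intended content of the text from that position. — e.g. on _parse_json_string_token("ab", -2): A returns ("bab", 2, false), B returns ("b", 2, false)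
import Mathlib
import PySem

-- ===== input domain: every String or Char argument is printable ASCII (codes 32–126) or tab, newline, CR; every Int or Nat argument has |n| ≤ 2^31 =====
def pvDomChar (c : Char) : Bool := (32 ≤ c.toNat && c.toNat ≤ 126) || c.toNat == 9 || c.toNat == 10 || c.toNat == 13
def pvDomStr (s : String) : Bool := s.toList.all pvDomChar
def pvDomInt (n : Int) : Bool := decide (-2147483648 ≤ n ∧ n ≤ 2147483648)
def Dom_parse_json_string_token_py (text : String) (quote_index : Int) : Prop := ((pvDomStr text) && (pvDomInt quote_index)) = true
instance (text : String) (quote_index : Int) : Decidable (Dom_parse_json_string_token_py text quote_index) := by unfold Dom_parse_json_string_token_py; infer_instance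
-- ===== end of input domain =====

-- B replaces A's char-by-char scan (escape flag + char accumulator) by repeated str.find jumps
-- to each '"' plus a backslash-run parity test, returning a slice of the text; a timing run
-- measured B faster by a constant factor (C-level find/slice instead of the per-char loop).

-- ===== PORT A =====
-- A's while loop; fuel = (len - index).toNat mirrors 'while index < text_len'; the pyGet? none
-- branch is Python's IndexError (excluded by Pre_).
def parseA_go (text : List Char) (fuel : Nat) (index : Int) (esc : Bool) (acc : List Char) :
    String × Int × Bool :=
  match fuel with
  | 0 => (String.ofList acc.reverse, index, false)
  | fuel + 1 =>
    match PySem.List.pyGet? text index with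
    | none => (String.ofList acc.reverse, index, false)
    | some ch =>
      if esc then parseA_go text fuel (index + 1) false (ch :: acc)
      else if ch = '\\' then parseA_go text fuel (index + 1) true (ch :: acc)
      else if ch = '"' then (String.ofList acc.reverse, index + 1, true)
      else parseA_go text fuel (index + 1) false (ch :: acc)

def parse_json_string_token_py (text : String) (quote_index : Int) : String × Int × Bool :=
  parseA_go text.toList ((text.toList.length : Int) - (quote_index + 1)).toNat
    (quote_index + 1) false []

-- ===== PORT B =====
-- B's inner 'while j > start and text[j-1] == '\\'': returns the final j.
def bsRunB (text : List Char) (start : Int) (fuel : Nat) (j : Int) : Int :=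
  match fuel with
  | 0 => j
  | fuel + 1 =>
    if start < j ∧ PySem.List.pyGet? text (j - 1) = some '\\' then bsRunB text start fuel (j - 1)
    else j

-- B's outer 'while True' loop; i strictly increases past each found quote, so
-- fuel = text.length + 2 is always enough (the fuel-0 branch is unreachable from the entry).
def parseB_go (text : List Char) (start : Int) (fuel : Nat) (i : Int) : String × Int × Bool :=
  match fuel with
  | 0 => (String.ofList [], 0, false)
  | fuel + 1 =>
    let pos := PySem.Chars.findFrom text ['"'] i none
    if pos = -1 then
      (String.ofList (PySem.List.slice text (some start) none), max start (text.length : Int), false)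
    else
      let j := bsRunB text start (pos - start).toNat pos
      if PySem.Int.mod (pos - j) 2 = 0 then
        (String.ofList (PySem.List.slice text (some start) (some pos)), pos + 1, true)
      else parseB_go text start fuel (pos + 1)

def parse_json_string_token_py_alt (text : String) (quote_index : Int) : String × Int × Bool :=
  parseB_go text.toList (quote_index + 1) (text.toList.length + 2) (quote_index + 1)

-- ===== PRECONDITION & SPEC =====
-- Pre_ excludes exactly the inputs where A raises IndexError (first read text[quote_index+1]
-- with quote_index + 1 < -len(text)).
def Pre_parse_json_string_token_py (text : String) (quote_index : Int) : Prop :=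
  -((text.toList.length : Int) + 1) ≤ quote_index
instance (text : String) (quote_index : Int) :
    Decidable (Pre_parse_json_string_token_py text quote_index) := by
  unfold Pre_parse_json_string_token_py; infer_instance

def pvWitness_parse_json_string_token_py : String × Int := ("\"ab\\\"c\" rest", 0)

-- For quote_index ≤ -2 (a negative start position, never produced by a JSON tokenizer) A scans
-- with Python's negative-index wraparound and re-reads characters, e.g. A("ab",-2) =
-- ("bab", 2, False), while B reads the suffix once and returns ("b", 2, False), the intended
-- content of the text from that position.
def D_parse_json_string_token_py (text : String) (quote_index : Int) : Prop :=
  quote_index ≤ -2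
instance (text : String) (quote_index : Int) :
    Decidable (D_parse_json_string_token_py text quote_index) := by
  unfold D_parse_json_string_token_py; infer_instance

def Spec_parse_json_string_token_py (text : String) (quote_index : Int)
    (out : String × Int × Bool) : Prop :=
  ¬ D_parse_json_string_token_py text quote_index →
    out = parse_json_string_token_py_alt text quote_index
instance (text : String) (quote_index : Int) (out : String × Int × Bool) :
    Decidable (Spec_parse_json_string_token_py text quote_index out) := by
  unfold Spec_parse_json_string_token_py; infer_instance

def pvDiffWitness_parse_json_string_token_py : String × Int := ("ab", -2)
def pvDiffWitnessOut_parse_json_string_token_py :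
    (String × Int × Bool) × (String × Int × Bool) := (("bab", 2, false), ("b", 2, false))

-- ===== CLAIM (what is proved, stated in full; the proofs are below) =====
def Claim_unchanged_parse_json_string_token_py : Prop :=
  ∀ (text : String) (quote_index : Int), Dom_parse_json_string_token_py text quote_index →
    Pre_parse_json_string_token_py text quote_index →
    Spec_parse_json_string_token_py text quote_index
      (parse_json_string_token_py text quote_index)
def Claim_changed_parse_json_string_token_py : Prop :=
  Dom_parse_json_string_token_py (pvDiffWitness_parse_json_string_token_py.1)
    (pvDiffWitness_parse_json_string_token_py.2) ∧
  Pre_parse_json_string_token_py (pvDiffWitness_parse_json_string_token_py.1)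
    (pvDiffWitness_parse_json_string_token_py.2) ∧
  D_parse_json_string_token_py (pvDiffWitness_parse_json_string_token_py.1)
    (pvDiffWitness_parse_json_string_token_py.2) ∧
  parse_json_string_token_py (pvDiffWitness_parse_json_string_token_py.1)
    (pvDiffWitness_parse_json_string_token_py.2) =
      pvDiffWitnessOut_parse_json_string_token_py.1 ∧
  parse_json_string_token_py_alt (pvDiffWitness_parse_json_string_token_py.1)
    (pvDiffWitness_parse_json_string_token_py.2) =
      pvDiffWitnessOut_parse_json_string_token_py.2 ∧
  pvDiffWitnessOut_parse_json_string_token_py.1 ≠ pvDiffWitnessOut_parse_json_string_token_py.2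

def Claim_exact_parse_json_string_token_py : Prop :=
  ∀ (text : String) (quote_index : Int), Dom_parse_json_string_token_py text quote_index →
    Pre_parse_json_string_token_py text quote_index →
    D_parse_json_string_token_py text quote_index →
    parse_json_string_token_py text quote_index ≠
      parse_json_string_token_py_alt text quote_index

-- ===== LEMMAS AND PROOFS =====
-- list-level reading of A's loop (proof device)
def scanA (l : List Char) (idx : Int) (esc : Bool) (acc : List Char) : String × Int × Bool :=
  match l with
  | [] => (String.ofList acc.reverse, idx, false)
  | c :: t =>
    if esc then scanA t (idx + 1) false (c :: acc)
    else if c = '\\' then scanA t (idx + 1) true (c :: acc)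
    else if c = '"' then (String.ofList acc.reverse, idx + 1, true)
    else scanA t (idx + 1) false (c :: acc)

-- A's escape state after scanning a (quote-free) block
def escAfter (esc : Bool) (l : List Char) : Bool :=
  l.foldl (fun e c => if e then false else decide (c = '\\')) esc

-- length of the trailing run of backslashes
def trailRun (l : List Char) : Nat :=
  (l.reverse.takeWhile (fun c => decide (c = '\\'))).length

lemma escAfter_cons (esc : Bool) (c : Char) (t : List Char) :
    escAfter esc (c :: t) = escAfter (if esc then false else decide (c = '\\')) t := rfl

lemma parseA_go_eq_scanA (text : List Char) :
    ∀ (fuel : Nat) (p : Int) (esc : Bool) (acc : List Char), 0 ≤ p →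
      ((text.length : Int) - p).toNat = fuel →
      parseA_go text fuel p esc acc = scanA (text.drop p.toNat) p esc acc := by
  intro fuel
  induction fuel with
  | zero =>
    intro p esc acc hp hf
    have h1 : text.length ≤ p.toNat := by omega
    rw [List.drop_eq_nil_of_le h1]
    rfl
  | succ fuel ih =>
    intro p esc acc hp hf
    have hlt : p.toNat < text.length := by omega
    have hget : PySem.List.pyGet? text p = some (text[p.toNat]) :=
      PySem.List.pyGet?_eq_some_getElem text hp (by omega)
    have hdrop := List.drop_eq_getElem_cons hlt
    have h1 : (p + 1).toNat = p.toNat + 1 := by omega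
    rw [hdrop]
    simp only [parseA_go, hget, scanA]
    cases esc with
    | true =>
      simp only [if_true]
      rw [ih (p + 1) false _ (by omega) (by omega), h1]
    | false =>
      by_cases hbs : text[p.toNat] = '\\'
      · simp only [hbs, Bool.false_eq_true, if_false, if_true]
        rw [ih (p + 1) true _ (by omega) (by omega), h1]
      · by_cases hq : text[p.toNat] = '"'
        · simp [hbs, hq]
        · simp only [hbs, hq, Bool.false_eq_true, if_false]
          rw [ih (p + 1) false _ (by omega) (by omega), h1]

lemma escAfter_append (esc : Bool) (a b : List Char) :
    escAfter esc (a ++ b) = escAfter (escAfter esc a) b :=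
  List.foldl_append

lemma scanA_seg (u : List Char) :
    ∀ (l : List Char) (idx : Int) (esc : Bool) (acc : List Char), '"' ∉ u →
      scanA (u ++ l) idx esc acc =
        scanA l (idx + u.length) (escAfter esc u) (u.reverse ++ acc) := by
  induction u with
  | nil => intro l idx esc acc _; simp [escAfter]
  | cons c t ih =>
    intro l idx esc acc h
    have hc : c ≠ '"' := fun hcq => h (by simp [hcq])
    have ht : '"' ∉ t := fun hm => h (List.mem_cons_of_mem _ hm)
    have hacc : t.reverse ++ (c :: acc) = (c :: t).reverse ++ acc := by simp
    have hidx : idx + 1 + (t.length : Int) = idx + ((c :: t).length : Int) := by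
      simp only [List.length_cons]; push_cast; ring
    rw [escAfter_cons]
    cases esc with
    | true =>
      simp only [List.cons_append, scanA, if_true]
      rw [ih l (idx + 1) false (c :: acc) ht, hacc, hidx]
    | false =>
      by_cases hbs : c = '\\'
      · simp only [List.cons_append, scanA, hbs, Bool.false_eq_true, if_false, if_true]
        rw [ih l (idx + 1) true ('\\' :: acc) ht]
        rw [hbs] at hacc hidx
        rw [hacc, hidx]
        norm_num
      · simp only [List.cons_append, scanA, hbs, hc, Bool.false_eq_true, if_false]
        rw [ih l (idx + 1) false (c :: acc) ht, hacc, hidx]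
        simp [hbs]

lemma trailRun_append_single (l : List Char) (c : Char) :
    trailRun (l ++ [c]) = if c = '\\' then trailRun l + 1 else 0 := by
  by_cases hc : c = '\\'
  · simp [trailRun, hc, List.takeWhile_cons]
  · simp [trailRun, List.takeWhile_cons_of_neg, hc]

lemma escAfter_parity (l : List Char) : escAfter false l = decide (trailRun l % 2 = 1) := by
  induction l using List.reverseRecOn with
  | nil => rfl
  | append_singleton l c ih =>
    rw [escAfter_append, trailRun_append_single]
    by_cases hc : c = '\\'
    · simp only [hc, if_true]
      rw [ih]
      by_cases hp : trailRun l % 2 = 1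
      · have h2 : (trailRun l + 1) % 2 ≠ 1 := by omega
        simp [hp, h2, escAfter]
      · have h2 : (trailRun l + 1) % 2 = 1 := by omega
        simp [hp, h2, escAfter]
    · simp only [hc, if_false]
      cases h : escAfter false l <;> simp [escAfter, hc]

lemma trailRun_append (a b : List Char) (h : a.getLast? ≠ some '\\') :
    trailRun (a ++ b) = trailRun b := by
  unfold trailRun
  rw [List.reverse_append, List.takeWhile_append]
  split_ifs with h1
  · cases har : a.reverse with
    | nil =>
      simp [h1]
    | cons x t =>
      have hx : a.getLast? = some x := by rw [← List.head?_reverse, har]; rfl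
      have hxbs : ¬ (decide (x = '\\') = true) := by
        simp only [decide_eq_true_eq]
        intro hxe; exact h (hxe ▸ hx)
      have htw : List.takeWhile (fun c => decide (c = '\\')) (x :: t) = [] :=
        List.takeWhile_cons_of_neg hxbs
      rw [htw]
      simp [h1]
  · rfl

lemma bsRunB_spec (text : List Char) (s : Nat) :
    ∀ (fuel : Nat) (p : Nat), s ≤ p → p ≤ text.length → p - s ≤ fuel →
      bsRunB text (s : Int) fuel (p : Int) =
        (p : Int) - (trailRun ((text.take p).drop s) : Int) := by
  intro fuel
  induction fuel with
  | zero =>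
    intro p hsp hpl hf
    have hps : p = s := by omega
    subst hps
    have hnil : (text.take p).drop p = [] :=
      List.drop_eq_nil_of_le (by simpa using Nat.min_le_left p text.length)
    rw [hnil]
    simp [bsRunB, trailRun]
  | succ fuel ih =>
    intro p hsp hpl hf
    by_cases hps : p = s
    · subst hps
      have hnil : (text.take p).drop p = [] :=
        List.drop_eq_nil_of_le (by simpa using Nat.min_le_left p text.length)
      rw [hnil]
      simp [bsRunB, trailRun]
    · have hslt : s < p := by omega
      have hlt : p - 1 < text.length := by omega
      have hwin : (text.take p).drop s = ((text.take (p - 1)).drop s) ++ [text[p - 1]] := by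
        have h1 : text.take p = text.take (p - 1) ++ [text[p - 1]] := by
          have h2 := @List.take_succ _ text (p - 1)
          rw [List.getElem?_eq_getElem hlt] at h2
          simpa [Nat.sub_add_cancel (by omega : 1 ≤ p)] using h2
        rw [h1, List.drop_append_of_le_length (by simp; omega)]
      have hget : PySem.List.pyGet? text ((p : Int) - 1) = some text[p - 1] := by
        have h3 := PySem.List.pyGet?_eq_some_getElem text
          (i := (p : Int) - 1) (by omega) (by omega)
        have ht : ((p : Int) - 1).toNat = p - 1 := by omega
        simp only [ht] at h3
        exact h3
      by_cases hc : text[p - 1] = '\\'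
      · have hcond : ((s : Int) < (p : Int) ∧
            PySem.List.pyGet? text ((p : Int) - 1) = some '\\') :=
          ⟨by exact_mod_cast hslt, by rw [hget, hc]⟩
        rw [bsRunB, if_pos hcond]
        have hcast : (p : Int) - 1 = ((p - 1 : Nat) : Int) := by omega
        rw [hcast, ih (p - 1) (by omega) (by omega) (by omega)]
        rw [hwin, trailRun_append_single, if_pos hc]
        push_cast
        omega
      · have hcond : ¬ ((s : Int) < (p : Int) ∧
            PySem.List.pyGet? text ((p : Int) - 1) = some '\\') := by
          rintro ⟨-, hx⟩
          rw [hget] at hx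
          exact hc (by injection hx)
        rw [bsRunB, if_neg hcond]
        rw [hwin, trailRun_append_single, if_neg hc]
        simp

lemma singleton_prefix_iff_head? (l : List Char) (c : Char) :
    [c] <+: l ↔ l.head? = some c := by
  constructor
  · rintro ⟨t, rfl⟩; rfl
  · intro h
    cases l with
    | nil => simp at h
    | cons x t => simp at h; subst h; exact ⟨t, rfl⟩

lemma parseB_go_eq (text : List Char) (s : Nat) (hs : s ≤ text.length) :
    ∀ (fuel : Nat) (k : Nat), s ≤ k → k ≤ text.length →
      (k = s ∨ text[k - 1]? = some '"') →
      text.length - k < fuel →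
      parseB_go text (s : Int) fuel (k : Int) =
        scanA (text.drop k) (k : Int) false ((text.take k).drop s).reverse := by
  intro fuel
  induction fuel with
  | zero => intro k _ _ _ hf; omega
  | succ fuel ih =>
    intro k hsk hkl hside hf
    -- the accumulated prefix never ends in a backslash (it is empty or ends at a skipped quote)
    have hprev : ((text.take k).drop s).getLast? ≠ some '\\' := by
      by_cases hks : k = s
      · subst hks
        rw [List.drop_eq_nil_of_le (by simp)]
        simp
      · rcases hside with rfl | hq
        · exact absurd rfl hks
        · have hlen : ((text.take k).drop s).length = k - s := by simp; omega
          rw [List.getLast?_eq_getElem?, hlen, List.getElem?_drop,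
            List.getElem?_take_of_lt (by omega),
            show s + (k - s - 1) = k - 1 by omega, hq]
          simp
    have hjoin : (text.take k).drop s ++ text.drop k = text.drop s := by
      conv_rhs => rw [← List.take_append_drop k text]
      rw [List.drop_append_of_le_length (by simp; omega)]
    simp only [parseB_go]
    rw [PySem.Chars.findFrom_natCast text ['"'] k hkl]
    by_cases hfind : PySem.Chars.find (text.drop k) ['"'] = -1
    · -- no quote from position k on: both sides take everything to the end
      rw [hfind]
      simp only [reduceIte]
      have hnq : '"' ∉ text.drop k := by
        intro hmem
        exact ((PySem.Chars.find_eq_neg_one_iff _ _).mp hfind)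
          ((List.singleton_infix_iff '"' _).mpr hmem)
      have hseg := scanA_seg (text.drop k) [] ((k : Nat) : Int) false
        ((text.take k).drop s).reverse hnq
      rw [List.append_nil] at hseg
      rw [hseg]
      simp only [scanA]
      refine Prod.ext ?_ (Prod.ext ?_ rfl)
      · rw [PySem.List.slice_from text (by omega : (0:Int) ≤ (s : Int))]
        simp [hjoin]
      · simp only []
        have : max ((s : Nat) : Int) ((text.length : Nat) : Int) = (text.length : Int) :=
          max_eq_right (by exact_mod_cast hs)
        simp [this]
        omega
    · -- a quote was found at position q = k + f
      have hf0 : 0 ≤ PySem.Chars.find (text.drop k) ['"'] := by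
        have := PySem.Chars.neg_one_le_find (text.drop k) ['"']
        omega
      obtain ⟨hpre, hmin⟩ := PySem.Chars.find_spec hf0
      set fq : Nat := (PySem.Chars.find (text.drop k) ['"']).toNat with hfq
      have hfcast : PySem.Chars.find (text.drop k) ['"'] = (fq : Int) :=
        (Int.toNat_of_nonneg hf0).symm
      have hq : text[k + fq]? = some '"' := by
        rw [List.drop_drop] at hpre
        have h4 := (singleton_prefix_iff_head? _ _).mp hpre
        rw [List.head?_drop] at h4
        exact h4
      set q : Nat := k + fq with hqdef
      have hqlt : q < text.length := by
        rcases List.getElem?_eq_some_iff.mp hq with ⟨hlt, -⟩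
        exact hlt
      have hqe : text[q] = '"' := by
        rcases List.getElem?_eq_some_iff.mp hq with ⟨hlt, he⟩
        exact he
      set u : List Char := (text.take q).drop k with hu
      have hulen : u.length = fq := by simp [hu]; omega
      have hdecomp : text.drop k = u ++ '"' :: text.drop (q + 1) := by
        have h1 : text.drop k = (text.take q).drop k ++ text.drop q := by
          conv_lhs => rw [← List.take_append_drop q text]
          rw [List.drop_append_of_le_length (by simp; omega)]
        rw [h1, List.drop_eq_getElem_cons hqlt, hqe]
      have hnq : '"' ∉ u := by
        intro hmem
        obtain ⟨i, hilen, hieq⟩ := List.getElem_of_mem hmem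
        have hif : i < fq := by rwa [hulen] at hilen
        have huq : u[i]? = some '"' := by
          rw [List.getElem?_eq_getElem hilen, hieq]
        have : text[k + i]? = some '"' := by
          rw [hu] at huq
          rwa [List.getElem?_drop, List.getElem?_take_of_lt (by omega)] at huq
        refine hmin i hif ?_
        rw [singleton_prefix_iff_head?, List.head?_drop, List.getElem?_drop]
        exact this
      have hpos : (k : Int) + PySem.Chars.find (text.drop k) ['"'] = (q : Int) := by
        rw [hfcast]; push_cast; omega
      rw [hpos]
      have hposne : ¬ ((q : Int) = -1) := by omega
      rw [if_neg hfind, if_neg hposne]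
      have hqs : ((q : Int) - (s : Int)).toNat = q - s := by omega
      rw [hqs, bsRunB_spec text s (q - s) q (by omega) (by omega) (by omega)]
      set r : Nat := trailRun ((text.take q).drop s) with hr
      have hsplit : (text.take q).drop s = ((text.take k).drop s) ++ u := by
        have e1 : (text.take q).take k = text.take k := by
          rw [List.take_take]; congr 1; omega
        calc (text.take q).drop s
            = ((text.take q).take k ++ (text.take q).drop k).drop s := by
              rw [List.take_append_drop]
          _ = ((text.take q).take k).drop s ++ (text.take q).drop k :=
              List.drop_append_of_le_length (by simp; omega)
          _ = (text.take k).drop s ++ u := by rw [e1]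
      have hru : r = trailRun u := by rw [hr, hsplit, trailRun_append _ _ hprev]
      have hdiff : (q : Int) - ((q : Int) - (r : Int)) = (r : Int) := by ring
      rw [hdiff]
      have hmodc : PySem.Int.mod ((r : Nat) : Int) 2 = ((r % 2 : Nat) : Int) := by
        exact_mod_cast PySem.Int.mod_natCast r 2
      rw [hmodc]
      have hesc : escAfter false u = decide (r % 2 = 1) := by
        rw [escAfter_parity, hru]
      by_cases hpar : r % 2 = 0
      · -- even run: this quote closes the token
        rw [if_pos (by exact_mod_cast hpar)]
        have hescf : escAfter false u = false := by
          rw [hesc]; simp; omega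
        rw [hdecomp, scanA_seg u _ _ _ _ hnq, hescf]
        have hstep : ∀ (idx : Int) (acc : List Char),
            scanA ('"' :: text.drop (q + 1)) idx false acc =
              (String.ofList acc.reverse, idx + 1, true) := by
          intro idx acc
          simp [scanA]
        rw [hstep]
        refine Prod.ext ?_ (Prod.ext ?_ rfl)
        · rw [PySem.List.slice_toNat text (by omega) (by omega)]
          simp only [Int.toNat_natCast]
          rw [← List.drop_take]
          simp [hsplit]
        · simp only []
          rw [hulen]
          push_cast
          omega
      · -- odd run: the quote is escaped, keep searching after it
        rw [if_neg (show ¬ ((r % 2 : Nat) : Int) = 0 by exact_mod_cast hpar)]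
        have hesct : escAfter false u = true := by rw [hesc]; simp; omega
        rw [hdecomp, scanA_seg u _ _ _ _ hnq, hesct]
        have hstep2 : ∀ (idx : Int) (acc : List Char),
            scanA ('"' :: text.drop (q + 1)) idx true acc =
              scanA (text.drop (q + 1)) (idx + 1) false ('"' :: acc) := by
          intro idx acc; simp [scanA]
        rw [hstep2]
        have hacc2 : ('"' :: (u.reverse ++ ((text.take k).drop s).reverse)) =
            ((text.take (q + 1)).drop s).reverse := by
          have ht1 : text.take (q + 1) = text.take q ++ [text[q]] := by
            have h2 := @List.take_succ _ text q
            rw [List.getElem?_eq_getElem hqlt] at h2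
            simpa using h2
          rw [ht1, hqe, List.drop_append_of_le_length (by simp; omega),
            List.reverse_append, hsplit]
          simp
        have hcast1 : (q : Int) + 1 = ((q + 1 : Nat) : Int) := by push_cast; ring
        have hidx2 : (k : Int) + (u.length : Int) + 1 = ((q + 1 : Nat) : Int) := by
          rw [hulen]; push_cast; omega
        rw [hcast1, ih (q + 1) (by omega) (by omega)
          (Or.inr (by simp only [Nat.add_sub_cancel]
                      rw [List.getElem?_eq_getElem hqlt, hqe])) (by omega)]
        rw [← hacc2, ← hidx2]



-- ========= accounting lemmas for the tightness theorem =========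

-- A's loop appends one character per consumed index: |raw| = next_index - start (- 1 on a close)
lemma parseA_go_len (text : List Char) :
    ∀ (fuel : Nat) (index : Int) (esc : Bool) (acc : List Char),
      -(text.length : Int) ≤ index → ((text.length : Int) - index).toNat = fuel →
      ((parseA_go text fuel index esc acc).1.toList.length : Int) =
        (parseA_go text fuel index esc acc).2.1 - index + acc.length -
          (if (parseA_go text fuel index esc acc).2.2 then 1 else 0) := by
  intro fuel
  induction fuel with
  | zero =>
    intro idx esc acc h1 h2
    simp [parseA_go, String.toList_ofList]
  | succ fuel ih =>
    intro idx esc acc h1 h2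
    have hlt : idx < (text.length : Int) := by omega
    obtain ⟨ch, hch⟩ : ∃ ch, PySem.List.pyGet? text idx = some ch := by
      cases h : PySem.List.pyGet? text idx with
      | none =>
        have hin : PySem.Raise.InRange text.length idx := by
          simp only [PySem.Raise.InRange]
          constructor <;> omega
        exact absurd ((PySem.List.pyGet?_eq_none_iff _ _).mp h) (not_not_intro hin)
      | some c => exact ⟨c, rfl⟩
    simp only [parseA_go, hch]
    have hrec : ∀ (e : Bool),
        ((parseA_go text fuel (idx + 1) e (ch :: acc)).1.toList.length : Int) =
          (parseA_go text fuel (idx + 1) e (ch :: acc)).2.1 - idx + acc.length -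
            (if (parseA_go text fuel (idx + 1) e (ch :: acc)).2.2 then 1 else 0) := by
      intro e
      have h3 := ih (idx + 1) e (ch :: acc) (by omega) (by omega)
      generalize hg : parseA_go text fuel (idx + 1) e (ch :: acc) = r at h3 ⊢
      obtain ⟨stg, i2, fl⟩ := r
      cases fl <;> simp only [List.length_cons, if_true] at h3 ⊢ <;>
        push_cast at h3 ⊢ <;> omega
    cases esc with
    | true =>
      rw [if_pos rfl]
      exact hrec false
    | false =>
      by_cases hbs : ch = '\\'
      · rw [if_neg (by simp), if_pos hbs]
        exact hrec true
      · by_cases hq : ch = '"'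
        · rw [if_neg (by simp), if_neg hbs, if_pos hq]
          simp only [String.toList_ofList, List.length_reverse, reduceIte]
          omega
        · rw [if_neg (by simp), if_neg hbs, if_neg hq]
          exact hrec false

-- s.find(sub, start) with a negative in-range start searches from len+start
lemma findFrom_neg (text sub : List Char) (st0 : Int) (h1 : st0 < 0)
    (h2 : 0 ≤ st0 + (text.length : Int)) :
    PySem.Chars.findFrom text sub st0 none =
      if PySem.Chars.find (text.drop (st0 + (text.length : Int)).toNat) sub = -1 then -1
      else (st0 + (text.length : Int)) +
        PySem.Chars.find (text.drop (st0 + (text.length : Int)).toNat) sub := by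
  simp only [PySem.Chars.findFrom]
  rw [if_pos h1, if_neg (show ¬ st0 + (text.length : Int) < 0 by omega)]
  rw [if_neg (show ¬ ((text.length : Int)) < st0 + (text.length : Int) by omega)]
  simp only [Int.toNat_natCast, List.take_length]

lemma clampIdx_neg_inrange (n : Nat) (a : Int) (h1 : a < 0) (h2 : 0 ≤ (n : Int) + a) :
    PySem.List.clampIdx n a = ((n : Int) + a).toNat := by
  simp only [PySem.List.clampIdx]
  rw [if_pos h1, if_neg (show ¬ (n : Int) + a < 0 by omega)]

lemma clampIdx_nonneg_le (n : Nat) (a : Int) (h1 : 0 ≤ a) (h2 : a ≤ (n : Int)) :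
    PySem.List.clampIdx n a = a.toNat := by
  simp only [PySem.List.clampIdx]
  rw [if_neg (show ¬ a < 0 by omega)]
  omega

-- B's no-quote exit: the returned triple satisfies the B accounting equation
lemma parseB_exit_none (text : List Char) (st0 : Int)
    (hst : -(text.length : Int) ≤ st0) (hst1 : st0 ≤ -1) :
    ((String.ofList (PySem.List.slice text (some st0) none)).toList.length : Int) =
      max st0 (text.length : Int) - ((text.length : Int) + st0) := by
  rw [PySem.List.slice_some_none, String.toList_ofList, List.length_drop]
  rw [clampIdx_neg_inrange text.length st0 (by omega) (by omega)]
  rw [max_eq_right (by omega : st0 ≤ (text.length : Int))]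
  omega

-- B's close exit at position q: |slice start q| = q - (len+start)
lemma parseB_exit_close (text : List Char) (st0 : Int) (q : Nat)
    (hst : -(text.length : Int) ≤ st0) (hst1 : st0 ≤ -1)
    (hq1 : (text.length : Int) + st0 ≤ (q : Int)) (hq2 : q ≤ text.length) :
    ((String.ofList (PySem.List.slice text (some st0) (some (q : Int)))).toList.length : Int) =
      (q : Int) - ((text.length : Int) + st0) := by
  rw [String.toList_ofList, PySem.List.length_slice]
  rw [clampIdx_neg_inrange text.length st0 (by omega) (by omega)]
  rw [clampIdx_nonneg_le text.length (q : Int) (by omega) (by omega)]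
  omega

-- B's loop after the first jump (i ≥ 0): accounting invariant
lemma parseB_go_len_pos (text : List Char) (st0 : Int)
    (hst : -(text.length : Int) ≤ st0) (hst1 : st0 ≤ -1) :
    ∀ (fuel : Nat) (i : Nat), (text.length : Int) + st0 < (i : Int) → i ≤ text.length →
      text.length - i < fuel →
      ((parseB_go text st0 fuel (i : Int)).1.toList.length : Int) =
        (parseB_go text st0 fuel (i : Int)).2.1 - ((text.length : Int) + st0) -
          (if (parseB_go text st0 fuel (i : Int)).2.2 then 1 else 0) := by
  intro fuel
  induction fuel with
  | zero => intro i h1 h2 h3; omega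
  | succ fuel ih =>
    intro i h1 h2 h3
    simp only [parseB_go]
    rw [PySem.Chars.findFrom_natCast text ['"'] i h2]
    by_cases hfind : PySem.Chars.find (text.drop i) ['"'] = -1
    · rw [hfind]
      simp only [reduceIte]
      have := parseB_exit_none text st0 hst hst1
      simp only [this]
      simp
    · have hf0 : 0 ≤ PySem.Chars.find (text.drop i) ['"'] := by
        have := PySem.Chars.neg_one_le_find (text.drop i) ['"']
        omega
      obtain ⟨hpre, -⟩ := PySem.Chars.find_spec hf0
      set fq : Nat := (PySem.Chars.find (text.drop i) ['"']).toNat with hfq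
      have hfcast : PySem.Chars.find (text.drop i) ['"'] = (fq : Int) :=
        (Int.toNat_of_nonneg hf0).symm
      have hq : text[i + fq]? = some '"' := by
        rw [List.drop_drop] at hpre
        have h4 := (singleton_prefix_iff_head? _ _).mp hpre
        rwa [List.head?_drop] at h4
      have hqlt : i + fq < text.length := by
        rcases List.getElem?_eq_some_iff.mp hq with ⟨hlt, -⟩
        exact hlt
      have hpos : (i : Int) + PySem.Chars.find (text.drop i) ['"'] = ((i + fq : Nat) : Int) := by
        rw [hfcast]; push_cast; ring
      rw [if_neg hfind, hpos]
      rw [if_neg (show ¬ (((i + fq : Nat) : Int)) = -1 by omega)]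
      by_cases hpar : PySem.Int.mod (((i + fq : Nat) : Int) -
          bsRunB text st0 ((((i + fq : Nat) : Int)) - st0).toNat (((i + fq : Nat) : Int))) 2 = 0
      · rw [if_pos hpar]
        have := parseB_exit_close text st0 (i + fq) hst hst1 (by push_cast; omega) (by omega)
        simp only [this]
        simp
        omega
      · rw [if_neg hpar]
        have hcast : (((i + fq : Nat) : Int)) + 1 = ((i + fq + 1 : Nat) : Int) := by push_cast; ring
        rw [hcast]
        exact ih (i + fq + 1) (by push_cast; omega) (by omega) (by omega)

-- B's entry call with the negative start start = len+2 fuel: accounting invariant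
lemma parseB_go_len_entry (text : List Char) (st0 : Int)
    (hst : -(text.length : Int) ≤ st0) (hst1 : st0 ≤ -1) :
    ((parseB_go text st0 (text.length + 2) st0).1.toList.length : Int) =
      (parseB_go text st0 (text.length + 2) st0).2.1 - ((text.length : Int) + st0) -
        (if (parseB_go text st0 (text.length + 2) st0).2.2 then 1 else 0) := by
  rw [show text.length + 2 = (text.length + 1) + 1 from rfl]
  simp only [parseB_go]
  rw [findFrom_neg text ['"'] st0 (by omega) (by omega)]
  set b : Nat := (st0 + (text.length : Int)).toNat with hb
  have hbcast : st0 + (text.length : Int) = (b : Int) := by omega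
  by_cases hfind : PySem.Chars.find (text.drop b) ['"'] = -1
  · rw [hbcast, hfind]
    simp only [reduceIte]
    have := parseB_exit_none text st0 hst hst1
    simp only [this]
    simp
  · have hf0 : 0 ≤ PySem.Chars.find (text.drop b) ['"'] := by
      have := PySem.Chars.neg_one_le_find (text.drop b) ['"']
      omega
    obtain ⟨hpre, -⟩ := PySem.Chars.find_spec hf0
    set fq : Nat := (PySem.Chars.find (text.drop b) ['"']).toNat with hfq
    have hfcast : PySem.Chars.find (text.drop b) ['"'] = (fq : Int) :=
      (Int.toNat_of_nonneg hf0).symm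
    have hq : text[b + fq]? = some '"' := by
      rw [List.drop_drop] at hpre
      have h4 := (singleton_prefix_iff_head? _ _).mp hpre
      rwa [List.head?_drop] at h4
    have hqlt : b + fq < text.length := by
      rcases List.getElem?_eq_some_iff.mp hq with ⟨hlt, -⟩
      exact hlt
    have hpos : st0 + (text.length : Int) + PySem.Chars.find (text.drop b) ['"'] =
        ((b + fq : Nat) : Int) := by
      rw [hfcast, hbcast]; push_cast; ring
    rw [if_neg hfind, hbcast]
    rw [show (b : Int) + PySem.Chars.find (text.drop b) ['"'] = ((b + fq : Nat) : Int) by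
      rw [hfcast]; push_cast; ring]
    rw [if_neg (show ¬ (((b + fq : Nat) : Int)) = -1 by omega)]
    by_cases hpar : PySem.Int.mod (((b + fq : Nat) : Int) -
        bsRunB text st0 ((((b + fq : Nat) : Int)) - st0).toNat (((b + fq : Nat) : Int))) 2 = 0
    · rw [if_pos hpar]
      have := parseB_exit_close text st0 (b + fq) hst hst1 (by push_cast; omega) (by omega)
      simp only [this]
      simp
      omega
    · rw [if_neg hpar]
      have hcast : (((b + fq : Nat) : Int)) + 1 = ((b + fq + 1 : Nat) : Int) := by push_cast; ring
      rw [hcast]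
      exact parseB_go_len_pos text st0 hst hst1 (text.length + 1) (b + fq + 1)
        (by push_cast; omega) (by omega) (by omega)

-- ===== VERDICT (by name: the statement is the Claim_ definition above) =====
theorem parse_json_string_token_py_spec : Claim_unchanged_parse_json_string_token_py := by
  unfold Claim_unchanged_parse_json_string_token_py
  intro text qi _hdom _hpre
  unfold Spec_parse_json_string_token_py
  intro hnd
  unfold D_parse_json_string_token_py at hnd
  set tl := text.toList with htl
  set s : Nat := (qi + 1).toNat with hsdef
  have hscast : qi + 1 = (s : Int) := by omega
  unfold parse_json_string_token_py parse_json_string_token_py_alt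
  rw [← htl, hscast]
  by_cases hsl : s ≤ tl.length
  · rw [parseA_go_eq_scanA tl _ ((s : Nat) : Int) false [] (by omega) rfl]
    rw [parseB_go_eq tl s hsl (tl.length + 2) s le_rfl hsl (Or.inl rfl) (by omega)]
    rw [List.drop_eq_nil_of_le (by simp : (tl.take s).length ≤ s)]
    simp
  · have hlen : tl.length < s := by omega
    rw [show ((tl.length : Int) - ((s : Nat) : Int)).toNat = 0 by omega]
    rw [show tl.length + 2 = (tl.length + 1) + 1 from rfl]
    have hff : PySem.Chars.findFrom tl ['"'] ((s : Nat) : Int) none = -1 := by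
      simp only [PySem.Chars.findFrom]
      rw [if_neg (show ¬ ((s : Nat) : Int) < 0 by omega)]
      rw [if_pos (show ((tl.length : Nat) : Int) < ((s : Nat) : Int) by exact_mod_cast hlen)]
    simp only [parseA_go, parseB_go, hff, reduceIte]
    refine Prod.ext ?_ (Prod.ext ?_ rfl)
    · rw [PySem.List.slice_from tl (by omega : (0 : Int) ≤ ((s : Nat) : Int))]
      simp only [Int.toNat_natCast]
      rw [List.drop_eq_nil_of_le (by omega)]
      simp
    · simp only []
      exact (max_eq_left (by exact_mod_cast Nat.le_of_lt hlen)).symm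

theorem parse_json_string_token_py_changed : Claim_changed_parse_json_string_token_py := by
  unfold Claim_changed_parse_json_string_token_py; decide

theorem parse_json_string_token_py_tight : Claim_exact_parse_json_string_token_py := by
  unfold Claim_exact_parse_json_string_token_py
  intro text qi _hdom hpre hd heq
  unfold Pre_parse_json_string_token_py at hpre
  unfold D_parse_json_string_token_py at hd
  set tl := text.toList with htl
  have hlen1 : 1 ≤ tl.length := by omega
  unfold parse_json_string_token_py parse_json_string_token_py_alt at heq
  rw [← htl] at heq
  have hA := parseA_go_len tl (((tl.length : Int) - (qi + 1)).toNat) (qi + 1) false []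
    (by omega) rfl
  have hB := parseB_go_len_entry tl (qi + 1) (by omega) (by omega)
  rw [heq] at hA
  generalize hg : parseB_go tl (qi + 1) (tl.length + 2) (qi + 1) = r at hA hB
  obtain ⟨stg, i2, fl⟩ := r
  cases fl <;> simp only [if_true, if_false] at hA hB <;> push_cast at hA hB <;> omega
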